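-- pv_equiv track=rewrite | github.com/Bob8081/TTL-CMOS_IC_Tester | generate_config.py | generate_ic_config
-- ===== SOURCE A (Python) =====
-- def map_pins(package_type):
--     pin_map = {}
--
--     if package_type == "DIP14":
--         # Pins 1-7 map to PORTD0 to PORTD6
--         for i in range(1, 8):
--             pin_map[i] = ("D", i - 1)  # PORTD(i-1)
--
--         # Pins 8-14 map to PORTA6 to PORTA0 (reversed order)
--         for i in range(8, 15):
--             pin_map[i] = ("A", 14 - i)  # PORTA(14-i)
--
--     elif package_type == "DIP16":
--         # Pins 1-8 map to PORTD0 to PORTD7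
--         for i in range(1, 9):
--             pin_map[i] = ("D", i - 1)  # PORTD(i-1)
--
--         # Pins 8-16 map to PORTA7 to PORTA0 (reversed order)
--         for i in range(9, 17):
--             pin_map[i] = ("A", 16 - i)  # PORTA(16-i)
--
--     else:
--         raise ValueError("Unsupported package type. Only DIP14 and DIP16 are supported.")
--
--     return pin_map
--
-- def generate_ic_config(name, package_type, input_pins, output_pins):
--
--     # Get the pin map for the given package type
--     pin_map = map_pins(package_type)
--
--     # Helper function to map pin numbers to port and bit
--     def map_pin_list(pin_list):
--         return [pin_map[pin] for pin in pin_list]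
--
--     # Map input and output pins to their respective ports and bits
--     input_pins_mapped = map_pin_list(input_pins)
--     output_pins_mapped = map_pin_list(output_pins)
--
--     # Helper function to generate port mask
--     def generate_port_mask(pins, port_letter):
--         return " | ".join([f"(1 << PORT{port_letter}{pin[1]})" for pin in pins if pin[0] == port_letter])
--
--     # Separate input and output pins by port (D, A, etc.)
--     input_mask_PD = generate_port_mask(input_pins_mapped, 'D')
--     input_mask_PA = generate_port_mask(input_pins_mapped, 'A')
--     output_mask_PD = generate_port_mask(output_pins_mapped, 'D')
--     output_mask_PA = generate_port_mask(output_pins_mapped, 'A')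
--
--     # Generate configuration string
--     config = f"""{{ // IC {name}
--     .input_mask_PD = {input_mask_PD if input_mask_PD else 0}, // Inputs on PORTD
--     .input_mask_PA = {input_mask_PA if input_mask_PA else 0}, // Inputs on PORTA
--     .output_mask_PD = {output_mask_PD if output_mask_PD else 0}, // Outputs on PORTD
--     .output_mask_PA = {output_mask_PA if output_mask_PA else 0}, // Outputs on PORTA
--     .package_type = {package_type},
--     .test_function = test_{name}
--     }}"""
--
--     return config
-- ===== SOURCE B (Python) =====
-- def generate_ic_config(name, package_type, input_pins, output_pins):
--     # Closed-form pin arithmetic instead of a precomputed lookup dict.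
--     sizes = {"DIP14": 14, "DIP16": 16}
--     if package_type not in sizes:
--         raise ValueError("Unsupported package type. Only DIP14 and DIP16 are supported.")
--     n = sizes[package_type]
--     half = n // 2
--     for pin in input_pins:
--         if not 1 <= pin <= n:
--             raise KeyError(pin)
--     for pin in output_pins:
--         if not 1 <= pin <= n:
--             raise KeyError(pin)
--
--     def mask_d(pins):
--         return " | ".join(f"(1 << PORTD{p - 1})" for p in pins if p <= half) or "0"
--
--     def mask_a(pins):
--         return " | ".join(f"(1 << PORTA{n - p})" for p in pins if p > half) or "0"
--
--     return (
--         f"{{ // IC {name}\n"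
--         f"    .input_mask_PD = {mask_d(input_pins)}, // Inputs on PORTD\n"
--         f"    .input_mask_PA = {mask_a(input_pins)}, // Inputs on PORTA\n"
--         f"    .output_mask_PD = {mask_d(output_pins)}, // Outputs on PORTD\n"
--         f"    .output_mask_PA = {mask_a(output_pins)}, // Outputs on PORTA\n"
--         f"    .package_type = {package_type},\n"
--         f"    .test_function = test_{name}\n"
--         f"    }}"
--     )
-- ===== Notes on version B (the rewrite author's own statement) =====
-- stated objective: simpler
-- what changed: B replaces A's range-loop-built pin_map dictionary and tuple-mapping passes by closed-form arithmetic: pins <= n//2 go to PORTD bit p-1, the rest to PORTA bit n-p, with the masks built directly from the pin lists.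
import Mathlib
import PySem

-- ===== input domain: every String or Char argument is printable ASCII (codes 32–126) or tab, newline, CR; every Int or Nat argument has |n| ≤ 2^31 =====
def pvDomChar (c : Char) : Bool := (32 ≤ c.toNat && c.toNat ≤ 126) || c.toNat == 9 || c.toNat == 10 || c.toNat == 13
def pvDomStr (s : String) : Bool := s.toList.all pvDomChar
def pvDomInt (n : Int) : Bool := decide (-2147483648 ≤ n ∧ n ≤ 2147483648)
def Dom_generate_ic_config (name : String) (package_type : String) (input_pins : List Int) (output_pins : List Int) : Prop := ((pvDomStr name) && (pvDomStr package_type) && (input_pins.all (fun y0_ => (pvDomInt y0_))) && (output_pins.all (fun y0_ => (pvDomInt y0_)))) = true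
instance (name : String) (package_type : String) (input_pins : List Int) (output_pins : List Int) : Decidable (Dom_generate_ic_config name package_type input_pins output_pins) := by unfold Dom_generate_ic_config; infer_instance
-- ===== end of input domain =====

-- B replaces A's loop-built pin_map dictionary by closed-form pin arithmetic (simpler; same cost).

-- ===== PORT A =====
-- map_pins: builds the pin dictionary with two range loops; none = ValueError
def pvMapPinsA (package_type : String) : Option (PySem.Dict Int (String × Int)) :=
  if package_type == "DIP14" then
    some ((PySem.List.pyRange 8 15 1).foldl (fun d i => d.insert i (("A" : String), 14 - i))
      ((PySem.List.pyRange 1 8 1).foldl (fun d i => d.insert i (("D" : String), i - 1)) PySem.Dict.empty))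
  else if package_type == "DIP16" then
    some ((PySem.List.pyRange 9 17 1).foldl (fun d i => d.insert i (("A" : String), 16 - i))
      ((PySem.List.pyRange 1 9 1).foldl (fun d i => d.insert i (("D" : String), i - 1)) PySem.Dict.empty))
  else none

-- map_pin_list: [pin_map[pin] for pin in pin_list]; none = KeyError
def pvMapPinListA (pm : PySem.Dict Int (String × Int)) : List Int → Option (List (String × Int))
  | [] => some []
  | p :: rest =>
    match pm.get? p, pvMapPinListA pm rest with
    | some v, some vs => some (v :: vs)
    | _, _ => none

-- generate_port_mask
def pvPortMaskA (pins : List (String × Int)) (letter : String) : String :=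
  PySem.Str.join " | " ((pins.filter (fun pr => pr.1 == letter)).map
    (fun pr => "(1 << PORT" ++ letter ++ PySem.Int.toStr pr.2 ++ ")"))

def generate_ic_config (name : String) (package_type : String) (input_pins : List Int) (output_pins : List Int) : String :=
  match pvMapPinsA package_type with
  | none => ""  -- ValueError in Python; excluded by Pre_
  | some pm =>
    match pvMapPinListA pm input_pins, pvMapPinListA pm output_pins with
    | some im, some om =>
      let iPD := pvPortMaskA im "D"
      let iPA := pvPortMaskA im "A"
      let oPD := pvPortMaskA om "D"
      let oPA := pvPortMaskA om "A"
      "{ // IC " ++ name ++ "\n    .input_mask_PD = " ++ (if iPD == "" then "0" else iPD) ++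
        ", // Inputs on PORTD\n    .input_mask_PA = " ++ (if iPA == "" then "0" else iPA) ++
        ", // Inputs on PORTA\n    .output_mask_PD = " ++ (if oPD == "" then "0" else oPD) ++
        ", // Outputs on PORTD\n    .output_mask_PA = " ++ (if oPA == "" then "0" else oPA) ++
        ", // Outputs on PORTA\n    .package_type = " ++ package_type ++
        ",\n    .test_function = test_" ++ name ++ "\n    }"
    | _, _ => ""  -- KeyError in Python; excluded by Pre_

-- ===== PORT B =====
-- mask_d: pins p with p <= half contribute PORTD bit p-1
def pvMaskDB (pins : List Int) (half : Int) : String :=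
  let s := PySem.Str.join " | " ((pins.filter (fun p => decide (p ≤ half))).map
    (fun p => "(1 << PORTD" ++ PySem.Int.toStr (p - 1) ++ ")"))
  if s == "" then "0" else s

-- mask_a: pins p with p > half contribute PORTA bit n-p
def pvMaskAB (pins : List Int) (n half : Int) : String :=
  let s := PySem.Str.join " | " ((pins.filter (fun p => decide (half < p))).map
    (fun p => "(1 << PORTA" ++ PySem.Int.toStr (n - p) ++ ")"))
  if s == "" then "0" else s

def generate_ic_config_alt (name : String) (package_type : String) (input_pins : List Int) (output_pins : List Int) : String :=
  if package_type == "DIP14" || package_type == "DIP16" then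
    let n : Int := if package_type == "DIP14" then 14 else 16
    if input_pins.all (fun p => decide (1 ≤ p ∧ p ≤ n)) && output_pins.all (fun p => decide (1 ≤ p ∧ p ≤ n)) then
      let half := PySem.Int.floordiv n 2
      "{ // IC " ++ name ++ "\n    .input_mask_PD = " ++ pvMaskDB input_pins half ++
        ", // Inputs on PORTD\n    .input_mask_PA = " ++ pvMaskAB input_pins n half ++
        ", // Inputs on PORTA\n    .output_mask_PD = " ++ pvMaskDB output_pins half ++
        ", // Outputs on PORTD\n    .output_mask_PA = " ++ pvMaskAB output_pins n half ++
        ", // Outputs on PORTA\n    .package_type = " ++ package_type ++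
        ",\n    .test_function = test_" ++ name ++ "\n    }"
    else ""  -- KeyError in Python; excluded by Pre_
  else ""  -- ValueError in Python; excluded by Pre_

-- ===== PRECONDITION & SPEC =====
-- Pre_ excludes exactly the inputs where A raises: ValueError for a package other than
-- DIP14/DIP16, KeyError for a pin outside 1..14 (resp. 1..16).
def Pre_generate_ic_config (name : String) (package_type : String) (input_pins : List Int) (output_pins : List Int) : Prop :=
  (package_type = "DIP14" ∨ package_type = "DIP16") ∧
  (∀ p ∈ input_pins, 1 ≤ p ∧ p ≤ (if package_type = "DIP14" then 14 else 16)) ∧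
  (∀ p ∈ output_pins, 1 ≤ p ∧ p ≤ (if package_type = "DIP14" then 14 else 16))

instance (name : String) (package_type : String) (input_pins : List Int) (output_pins : List Int) : Decidable (Pre_generate_ic_config name package_type input_pins output_pins) := by
  unfold Pre_generate_ic_config; infer_instance

def pvWitness_generate_ic_config : String × String × List Int × List Int := ("74LS00", "DIP14", [1, 8, 3], [14, 7])

def Spec_generate_ic_config (name : String) (package_type : String) (input_pins : List Int) (output_pins : List Int) (out : String) : Prop := out = generate_ic_config_alt name package_type input_pins output_pins
instance (name : String) (package_type : String) (input_pins : List Int) (output_pins : List Int) (out : String) : Decidable (Spec_generate_ic_config name package_type input_pins output_pins out) := by unfold Spec_generate_ic_config; infer_instance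

-- ===== CLAIM (what is proved, stated in full; the proofs are below) =====
def Claim_equal_generate_ic_config : Prop := ∀ (name : String) (package_type : String) (input_pins : List Int) (output_pins : List Int), Dom_generate_ic_config name package_type input_pins output_pins → Pre_generate_ic_config name package_type input_pins output_pins → Spec_generate_ic_config name package_type input_pins output_pins (generate_ic_config name package_type input_pins output_pins)

-- ===== LEMMAS AND PROOFS =====

-- closed form of the pin map: the function B computes
def pvF (n half p : Int) : String × Int := if p ≤ half then ("D", p - 1) else ("A", n - p)

lemma pm14_get (p : Int) (h1 : 1 ≤ p) (h2 : p ≤ 14) :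
    (((PySem.List.pyRange 8 15 1).foldl (fun d i => d.insert i (("A" : String), 14 - i))
      ((PySem.List.pyRange 1 8 1).foldl (fun d i => d.insert i (("D" : String), i - 1))
        PySem.Dict.empty))).get? p = some (pvF 14 7 p) := by
  interval_cases p <;> decide

lemma pm16_get (p : Int) (h1 : 1 ≤ p) (h2 : p ≤ 16) :
    (((PySem.List.pyRange 9 17 1).foldl (fun d i => d.insert i (("A" : String), 16 - i))
      ((PySem.List.pyRange 1 9 1).foldl (fun d i => d.insert i (("D" : String), i - 1))
        PySem.Dict.empty))).get? p = some (pvF 16 8 p) := by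
  interval_cases p <;> decide

lemma mapPinList_eq (pm : PySem.Dict Int (String × Int)) (f : Int → String × Int)
    (xs : List Int) (h : ∀ p ∈ xs, pm.get? p = some (f p)) :
    pvMapPinListA pm xs = some (xs.map f) := by
  induction xs with
  | nil => rfl
  | cons p rest ih =>
    simp only [pvMapPinListA, h p (List.mem_cons_self ..),
      ih (fun q hq => h q (List.mem_cons_of_mem _ hq)), List.map_cons]

lemma maskD_eq (n half : Int) (xs : List Int) :
    pvPortMaskA (xs.map (pvF n half)) "D"
      = PySem.Str.join " | " ((xs.filter (fun p => decide (p ≤ half))).map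
          (fun p => "(1 << PORTD" ++ PySem.Int.toStr (p - 1) ++ ")")) := by
  unfold pvPortMaskA
  have hf : (fun pr : String × Int => "(1 << PORT" ++ "D" ++ PySem.Int.toStr pr.2 ++ ")")
      = (fun pr : String × Int => "(1 << PORTD" ++ PySem.Int.toStr pr.2 ++ ")") := by
    funext pr; rw [show ("(1 << PORT" ++ "D" : String) = "(1 << PORTD" from rfl]
  rw [hf]
  congr 1
  induction xs with
  | nil => rfl
  | cons p rest ih =>
    by_cases hp : p ≤ half
    · simp [List.filter_cons, pvF, hp, ih]
    · simp [List.filter_cons, pvF, hp, ih]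

lemma maskA_eq (n half : Int) (xs : List Int) :
    pvPortMaskA (xs.map (pvF n half)) "A"
      = PySem.Str.join " | " ((xs.filter (fun p => decide (half < p))).map
          (fun p => "(1 << PORTA" ++ PySem.Int.toStr (n - p) ++ ")")) := by
  unfold pvPortMaskA
  have hf : (fun pr : String × Int => "(1 << PORT" ++ "A" ++ PySem.Int.toStr pr.2 ++ ")")
      = (fun pr : String × Int => "(1 << PORTA" ++ PySem.Int.toStr pr.2 ++ ")") := by
    funext pr; rw [show ("(1 << PORT" ++ "A" : String) = "(1 << PORTA" from rfl]
  rw [hf]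
  congr 1
  induction xs with
  | nil => rfl
  | cons p rest ih =>
    by_cases hp : p ≤ half
    · simp [List.filter_cons, pvF, hp, ih, show ¬ half < p by omega]
    · simp [List.filter_cons, pvF, hp, ih, show half < p by omega]

-- ===== VERDICT (by name: the statement is the Claim_ definition above) =====
theorem generate_ic_config_spec : Claim_equal_generate_ic_config := by
  intro name package_type input_pins output_pins _hdom hpre
  obtain ⟨hpkg, hin, hout⟩ := hpre
  unfold Spec_generate_ic_config generate_ic_config generate_ic_config_alt
  rcases hpkg with h | h <;> subst h
  · -- DIP14
    simp only [reduceIte] at hin hout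
    have hall : (input_pins.all (fun p => decide (1 ≤ p ∧ p ≤ (14:Int)))
        && output_pins.all (fun p => decide (1 ≤ p ∧ p ≤ (14:Int)))) = true := by
      simp only [Bool.and_eq_true, List.all_eq_true, decide_eq_true_eq]
      exact ⟨hin, hout⟩
    simp only [pvMapPinsA, show (("DIP14" : String) == "DIP14") = true from rfl,
      show (("DIP14" : String) == "DIP16") = false from rfl, Bool.true_or, if_true, if_false,
      show PySem.Int.floordiv 14 2 = 7 from by decide, hall,
      mapPinList_eq _ (pvF 14 7) input_pins
        (fun p hp => pm14_get p (hin p hp).1 (hin p hp).2),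
      mapPinList_eq _ (pvF 14 7) output_pins
        (fun p hp => pm14_get p (hout p hp).1 (hout p hp).2),
      maskD_eq, maskA_eq, pvMaskDB, pvMaskAB]
  · -- DIP16
    rw [if_neg (by decide : ¬ ("DIP16" : String) = "DIP14")] at hin hout
    have hall : (input_pins.all (fun p => decide (1 ≤ p ∧ p ≤ (16:Int)))
        && output_pins.all (fun p => decide (1 ≤ p ∧ p ≤ (16:Int)))) = true := by
      simp only [Bool.and_eq_true, List.all_eq_true, decide_eq_true_eq]
      exact ⟨hin, hout⟩
    simp only [pvMapPinsA, show (("DIP16" : String) == "DIP14") = false from rfl,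
      show (("DIP16" : String) == "DIP16") = true from rfl, Bool.or_true, Bool.false_eq_true, if_true, if_false,
      show PySem.Int.floordiv 16 2 = 8 from by decide, hall,
      mapPinList_eq _ (pvF 16 8) input_pins
        (fun p hp => pm16_get p (hin p hp).1 (hin p hp).2),
      mapPinList_eq _ (pvF 16 8) output_pins
        (fun p hp => pm16_get p (hout p hp).1 (hout p hp).2),
      maskD_eq, maskA_eq, pvMaskDB, pvMaskAB]
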